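-- pv_equiv track=rewrite | github.com/hasanjafri/DailyCodingProblems | #1287/mega_corp_bonuses.py | mega_corp_bonuses
-- ===== SOURCE A (Python) =====
-- def mega_corp_bonuses(arr):
--     # Sort the array in non-ascending order
--     arr.sort(reverse=True)
--     # Initialize the bonus array with the same number of elements as arr
--     bonuses = [0] * len(arr)
--     # Assign the first bonus
--     bonuses[-1] = 1
--     # Iterate through the array in reverse
--     for i in range(len(arr) - 2, -1, -1):
--         # If the current employee has more lines of code than the previous one,
--         # their bonus should be one greater than the previous employee's bonus
--         if arr[i] > arr[i + 1]:
--             bonuses[i] = bonuses[i + 1] + 1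
--         # Otherwise, their bonus should be the same as the previous employee's bonus
--         else:
--             bonuses[i] = bonuses[i + 1]
--     # Reverse the bonuses array to get the correct order
--     bonuses.reverse()
--     return bonuses
-- ===== SOURCE B (Python) =====
-- def mega_corp_bonuses(arr):
--     # Same in-place descending sort as A (caller-visible mutation kept).
--     arr.sort(reverse=True)
--     # Dense-rank table: distinct values ascending -> 1, 2, 3, ...
--     rank = {v: i for i, v in enumerate(sorted(set(arr)), 1)}
--     # Result corresponds to the values in ascending order.
--     return [rank[v] for v in reversed(arr)]
-- ===== Notes on version B (the rewrite author's own statement) =====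
-- stated objective: simpler
-- what changed: A's backward carry-propagation loop over indices (bonuses[i] from bonuses[i+1]) is replaced by building a dense-rank dictionary from the distinct values (sorted ascending -> 1,2,3,...) and mapping it over the values in ascending order; both keep the in-place descending sort of arr.
import Mathlib
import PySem

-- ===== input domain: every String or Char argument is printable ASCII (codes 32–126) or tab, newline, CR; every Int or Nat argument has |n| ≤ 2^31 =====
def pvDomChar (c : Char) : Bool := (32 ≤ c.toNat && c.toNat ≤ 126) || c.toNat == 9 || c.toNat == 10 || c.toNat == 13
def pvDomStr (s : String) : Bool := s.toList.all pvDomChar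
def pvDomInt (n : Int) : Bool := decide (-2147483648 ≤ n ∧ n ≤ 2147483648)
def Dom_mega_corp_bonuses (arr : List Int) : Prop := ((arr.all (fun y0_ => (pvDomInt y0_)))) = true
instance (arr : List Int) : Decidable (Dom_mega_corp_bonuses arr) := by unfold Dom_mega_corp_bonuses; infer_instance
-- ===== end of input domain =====

-- B replaces A's backward carry-propagation over indices with a dense-rank table (distinct values → 1,2,3,…)
-- looked up over the values in ascending order (objective: simpler). Both A and B sort the argument in place
-- (same caller-visible mutation); the theorems here are about the return value.

-- ===== PORT A =====
def mega_corp_bonuses (arr : List Int) : List Int :=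
  -- arr.sort(reverse=True)
  let s := PySem.List.sorted arr (fun x => x) true
  -- bonuses = [0] * len(arr)
  let bonuses := List.replicate s.length (0 : Int)
  -- bonuses[-1] = 1  (IndexError on empty arr: excluded by Pre_)
  let bonuses := PySem.List.pySetD bonuses (-1) 1
  -- for i in range(len(arr) - 2, -1, -1): …  (indices i, i+1 are in range here)
  let bonuses := (PySem.List.pyRange ((s.length : Int) - 2) (-1) (-1)).foldl
    (fun b i =>
      if PySem.List.pyGetD s (i + 1) 0 < PySem.List.pyGetD s i 0 then
        PySem.List.pySetD b i (PySem.List.pyGetD b (i + 1) 0 + 1)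
      else
        PySem.List.pySetD b i (PySem.List.pyGetD b (i + 1) 0)) bonuses
  -- bonuses.reverse(); return bonuses
  bonuses.reverse

-- ===== PORT B =====
def mega_corp_bonuses_alt (arr : List Int) : List Int :=
  -- arr.sort(reverse=True)
  let s := PySem.List.sorted arr (fun x => x) true
  -- rank = {v: i for i, v in enumerate(sorted(set(arr)), 1)}
  let rank : PySem.Dict Int Int :=
    (PySem.List.enumerate (PySem.List.sorted (PySem.Set.ofList s) (fun x => x) false) 1).foldl
      (fun d p => d.insert p.2 p.1) PySem.Dict.empty
  -- [rank[v] for v in reversed(arr)]  (every v is a key, so rank[v] never raises; ported as getD)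
  s.reverse.map (fun v => rank.getD v 0)

-- ===== PRECONDITION & SPEC =====
-- A raises IndexError on the empty list (bonuses[-1] on []), so Pre_ excludes exactly arr = [].
def Pre_mega_corp_bonuses (arr : List Int) : Prop := arr ≠ []
instance (arr : List Int) : Decidable (Pre_mega_corp_bonuses arr) := by unfold Pre_mega_corp_bonuses; infer_instance
def pvWitness_mega_corp_bonuses : List Int := [3, 1, 3, 2]

def Spec_mega_corp_bonuses (arr : List Int) (out : List Int) : Prop := out = mega_corp_bonuses_alt arr
instance (arr : List Int) (out : List Int) : Decidable (Spec_mega_corp_bonuses arr out) := by unfold Spec_mega_corp_bonuses; infer_instance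

-- ===== CLAIM (what is proved, stated in full; the proofs are below) =====
def Claim_equal_mega_corp_bonuses : Prop := ∀ (arr : List Int), Dom_mega_corp_bonuses arr → Pre_mega_corp_bonuses arr → Spec_mega_corp_bonuses arr (mega_corp_bonuses arr)

-- ===== LEMMAS AND PROOFS =====

def rLoop : List Int → List Int
  | [] => []
  | [_] => [1]
  | x :: y :: rest =>
    (if y < x then (rLoop (y :: rest)).headD 0 + 1 else (rLoop (y :: rest)).headD 0) :: rLoop (y :: rest)

theorem rLoop_length : ∀ (l : List Int), (rLoop l).length = l.length := by
  intro l
  match l with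
  | [] => rfl
  | [_] => rfl
  | x :: y :: rest => simp [rLoop, rLoop_length (y :: rest)]

def dRank (s : List Int) (v : Int) : Int := 1 + ((s.toFinset.filter (fun u => u < v)).card : Int)

theorem set_at_join (xs : List Int) (y v : Int) (ys : List Int) :
    (xs ++ y :: ys).set xs.length v = xs ++ v :: ys := by
  induction xs with
  | nil => rfl
  | cons a t ih => simp [List.set_cons_succ, ih]

-- CHUNK 1
theorem loop_inv (s : List Int) :
    ∀ (k : Nat), k + 1 ≤ s.length →
    (PySem.List.pyRange ((k : Int) - 1) (-1) (-1)).foldl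
      (fun b i =>
        if PySem.List.pyGetD s (i + 1) 0 < PySem.List.pyGetD s i 0 then
          PySem.List.pySetD b i (PySem.List.pyGetD b (i + 1) 0 + 1)
        else
          PySem.List.pySetD b i (PySem.List.pyGetD b (i + 1) 0))
      (List.replicate k 0 ++ rLoop (s.drop k)) = rLoop s := by
  intro k
  induction k with
  | zero =>
    intro _
    rw [PySem.List.pyRange_neg_one_eq_nil (by norm_num)]
    simp
  | succ k ih =>
    intro hk
    have h1 : k + 1 < s.length := by omega
    have h2 : k < s.length := by omega
    have hcast : ((k + 1 : Nat) : Int) - 1 = (k : Int) := by push_cast; ring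
    rw [hcast, PySem.List.pyRange_neg_one_cons (by omega : (-1 : Int) < (k : Int)), List.foldl_cons]
    -- the tail list rLoop (s.drop (k+1)) is nonempty
    have hne : rLoop (s.drop (k + 1)) ≠ [] := by
      have := rLoop_length (s.drop (k + 1))
      intro hnil; rw [hnil] at this; simp at this; omega
    obtain ⟨h0, t0, hrl⟩ := List.exists_cons_of_ne_nil hne
    have hc1 : ((k : Int) + 1) = ((k + 1 : Nat) : Int) := by push_cast; ring
    have e1 : PySem.List.pyGetD s ((k : Int) + 1) 0 = s[k + 1] := by
      rw [hc1, PySem.List.pyGetD_natCast, List.getD_eq_getElem]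
    have e2 : PySem.List.pyGetD s ((k : Int)) 0 = s[k] := by
      rw [PySem.List.pyGetD_natCast, List.getD_eq_getElem]
    have e3 : PySem.List.pyGetD (List.replicate (k + 1) (0 : Int) ++ rLoop (s.drop (k + 1))) ((k : Int) + 1) 0 = h0 := by
      rw [hc1, PySem.List.pyGetD_natCast]
      have : (List.replicate (k + 1) (0 : Int)).length = k + 1 := by simp
      rw [List.getD_eq_getElem?_getD, List.getElem?_append_right (by simp), this]
      simp [hrl]
    have e4 : ∀ v : Int, PySem.List.pySetD (List.replicate (k + 1) (0 : Int) ++ rLoop (s.drop (k + 1))) ((k : Int)) v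
        = List.replicate k 0 ++ v :: rLoop (s.drop (k + 1)) := by
      intro v
      rw [PySem.List.pySetD_natCast]
      have : List.replicate (k + 1) (0 : Int) = List.replicate k 0 ++ [0] := List.replicate_succ' ..
      rw [this, List.append_assoc, List.singleton_append]
      have h5 := set_at_join (List.replicate k (0 : Int)) 0 v (rLoop (s.drop (k + 1)))
      rwa [List.length_replicate] at h5
    have hdk : s.drop k = s[k] :: s.drop (k + 1) := List.drop_eq_getElem_cons h2
    have hdk1 : s.drop (k + 1) = s[k + 1] :: s.drop (k + 2) := List.drop_eq_getElem_cons h1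
    have hrk : rLoop (s.drop k) = (if s[k + 1] < s[k] then h0 + 1 else h0) :: rLoop (s.drop (k + 1)) := by
      rw [hdk]
      conv_lhs => rw [hdk1]
      show (if s[k+1] < s[k] then (rLoop (s[k+1] :: s.drop (k+2))).headD 0 + 1
            else (rLoop (s[k+1] :: s.drop (k+2))).headD 0) :: rLoop (s[k+1] :: s.drop (k+2))
          = _
      rw [← hdk1, hrl]
      simp
    have hstep :
        (if PySem.List.pyGetD s ((k : Int) + 1) 0 < PySem.List.pyGetD s ((k : Int)) 0 then
          PySem.List.pySetD (List.replicate (k + 1) (0 : Int) ++ rLoop (s.drop (k + 1))) ((k : Int))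
            (PySem.List.pyGetD (List.replicate (k + 1) (0 : Int) ++ rLoop (s.drop (k + 1))) ((k : Int) + 1) 0 + 1)
        else
          PySem.List.pySetD (List.replicate (k + 1) (0 : Int) ++ rLoop (s.drop (k + 1))) ((k : Int))
            (PySem.List.pyGetD (List.replicate (k + 1) (0 : Int) ++ rLoop (s.drop (k + 1))) ((k : Int) + 1) 0))
        = List.replicate k 0 ++ rLoop (s.drop k) := by
      rw [e1, e2, e3, e4, e4, hrk]
      split_ifs <;> rfl
    show (PySem.List.pyRange ((k : Int) - 1) (-1) (-1)).foldl _ _ = _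
    rw [hstep]  -- placeholder; fix below if mismatch
    exact ih (by omega)

-- CHUNK 2
theorem rLoop_eq_map_dRank : ∀ (s : List Int), s.Pairwise (fun a b => b ≤ a) → rLoop s = s.map (dRank s) := by
  intro s hp
  match s with
  | [] => rfl
  | [x] => simp [rLoop, dRank, Finset.filter_singleton]
  | x :: y :: rest =>
    have hp' : (y :: rest).Pairwise (fun a b => b ≤ a) := hp.of_cons
    have ih := rLoop_eq_map_dRank (y :: rest) hp'
    have hall : ∀ u ∈ y :: rest, u ≤ x := (List.pairwise_cons.mp hp).1
    have hyx : y ≤ x := hall y (by simp)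
    have hally : ∀ u ∈ rest, u ≤ y := (List.pairwise_cons.mp hp').1
    have hsame : ∀ v ∈ y :: rest, dRank (x :: y :: rest) v = dRank (y :: rest) v := by
      intro v hv
      have hnv : ¬ x < v := not_lt.mpr (hall v hv)
      unfold dRank
      rw [List.toFinset_cons, Finset.filter_insert, if_neg hnv]
    have hheadD : (rLoop (y :: rest)).headD 0 = dRank (y :: rest) y := by
      rw [ih]; simp
    have hhead : dRank (x :: y :: rest) x = (if y < x then dRank (y :: rest) y + 1 else dRank (y :: rest) y) := by
      by_cases hlt : y < x
      · rw [if_pos hlt]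
        unfold dRank
        rw [List.toFinset_cons, Finset.filter_insert, if_neg (lt_irrefl x)]
        have hset : (y :: rest).toFinset.filter (fun u => u < x)
            = insert y ((y :: rest).toFinset.filter (fun u => u < y)) := by
          ext u
          simp only [Finset.mem_filter, Finset.mem_insert, List.mem_toFinset]
          constructor
          · rintro ⟨hu, hux⟩
            by_cases huy : u = y
            · exact Or.inl huy
            · refine Or.inr ⟨hu, ?_⟩
              rcases List.mem_cons.mp hu with h | h
              · exact absurd h huy
              · exact lt_of_le_of_ne (hally u h) huy
          · rintro (rfl | ⟨hu, huy⟩)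
            · exact ⟨by simp, hlt⟩
            · exact ⟨hu, lt_trans huy hlt⟩
        rw [hset, Finset.card_insert_of_notMem (by simp)]
        push_cast; ring
      · rw [if_neg hlt]
        have hxy : x = y := le_antisymm (not_lt.mp hlt) hyx
        subst hxy
        unfold dRank
        rw [List.toFinset_cons, Finset.insert_eq_self.mpr (by simp)]
    show (if y < x then (rLoop (y :: rest)).headD 0 + 1 else (rLoop (y :: rest)).headD 0) :: rLoop (y :: rest)
        = (x :: y :: rest).map (dRank (x :: y :: rest))
    rw [List.map_cons, List.map_congr_left (fun v hv => hsame v hv), ← ih, hhead, hheadD]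
  
-- index-in-strictly-increasing-list = count of smaller elements
theorem idx_count : ∀ (d : List Int), d.Pairwise (· < ·) → ∀ (j : Nat) (h : j < d.length),
    d.countP (fun u => decide (u < d[j])) = j := by
  intro d hp j h
  match d, j, h with
  | x :: rest, 0, h =>
    have hgt : ∀ u ∈ rest, x < u := (List.pairwise_cons.mp hp).1
    simp only [List.getElem_cons_zero]
    rw [List.countP_eq_zero]
    intro u hu
    rcases List.mem_cons.mp hu with rfl | hur
    · simp
    · simp [not_lt.mpr (le_of_lt (hgt u hur))]
  | x :: rest, j + 1, h =>
    have hp' := hp.of_cons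
    have hjr : j < rest.length := by simpa using h
    have hgt : ∀ u ∈ rest, x < u := (List.pairwise_cons.mp hp).1
    have ihj := idx_count rest hp' j hjr
    simp only [List.countP_cons, List.getElem_cons_succ]
    have hx : x < rest[j] := hgt _ (List.getElem_mem hjr)
    rw [if_pos (by simpa using hx)]
    exact congrArg (· + 1) ihj

-- CHUNK 3
theorem rank_getD (s : List Int) (v : Int) (hv : v ∈ s) :
    (((PySem.List.enumerate (PySem.List.sorted (PySem.Set.ofList s) (fun x => x) false) 1).foldl
      (fun d p => d.insert p.2 p.1) PySem.Dict.empty).getD v 0) = dRank s v := by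
  set d := PySem.List.sorted (PySem.Set.ofList s) (fun x => x) false with hd
  have hpw : d.Pairwise (· < ·) := PySem.List.sorted_ofList_pairwise_lt s
  have hnd : d.Nodup := hpw.imp ne_of_lt
  have hvd : v ∈ d := by
    rw [hd, PySem.List.mem_sorted]
    exact (PySem.Set.mem_ofList s v).mpr hv
  obtain ⟨j, hj, hjv⟩ := List.getElem_of_mem hvd
  have hsnd : (PySem.List.enumerate d 1).map (fun p => p.2) = d := PySem.List.map_snd_enumerate ..
  have hitems : ((PySem.List.enumerate d 1).foldl (fun dd p => dd.insert p.2 p.1) (PySem.Dict.empty : PySem.Dict Int Int)).items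
      = (PySem.List.enumerate d 1).map (fun p => (p.2, p.1)) := by
    have := PySem.Dict.items_foldl_insert_fresh (PySem.List.enumerate d 1) (fun p => p.2) (fun p => p.1)
      (PySem.Dict.empty : PySem.Dict Int Int) (fun a _ => PySem.Dict.contains_empty ..) (by rw [hsnd]; exact hnd)
    simpa using this
  have hkeys : ((PySem.List.enumerate d 1).foldl (fun dd p => dd.insert p.2 p.1) (PySem.Dict.empty : PySem.Dict Int Int)).keys = d := by
    simp only [PySem.Dict.keys, hitems, List.map_map]
    exact hsnd
  have hknd : ((PySem.List.enumerate d 1).foldl (fun dd p => dd.insert p.2 p.1) (PySem.Dict.empty : PySem.Dict Int Int)).keys.Nodup := by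
    rw [hkeys]; exact hnd
  have hmem : (v, (1 : Int) + (j : Int)) ∈ ((PySem.List.enumerate d 1).foldl (fun dd p => dd.insert p.2 p.1) (PySem.Dict.empty : PySem.Dict Int Int)).items := by
    rw [hitems]
    refine List.mem_map.mpr ⟨((1 : Int) + (j : Int), v), ?_, rfl⟩
    exact (PySem.List.mem_enumerate_iff ..).mpr ⟨j, hj, by rw [hjv]⟩
  rw [PySem.Dict.getD_of_mem_items _ hmem hknd 0]
  -- 1 + j = dRank s v
  have hcnt : d.countP (fun u => decide (u < v)) = j := by
    have := idx_count d hpw j hj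
    rw [hjv] at this; exact this
  have hfin : s.toFinset = d.toFinset := by
    ext u
    simp [List.mem_toFinset, hd, PySem.List.mem_sorted, PySem.Set.mem_ofList]
  have hcard : (s.toFinset.filter (fun u => u < v)).card = j := by
    rw [hfin]
    have : d.toFinset.filter (fun u => u < v) = (d.filter (fun u => decide (u < v))).toFinset := by
      rw [List.toFinset_filter]
      ext u; simp
    rw [this, List.toFinset_card_of_nodup (hnd.filter _)]
    rw [← hcnt, List.countP_eq_length_filter]
  unfold dRank
  rw [hcard]

-- ===== VERDICT (by name: the statement is the Claim_ definition above) =====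
theorem mega_corp_bonuses_spec : Claim_equal_mega_corp_bonuses := by
  intro arr _ hpre
  unfold Spec_mega_corp_bonuses
  simp only [mega_corp_bonuses, mega_corp_bonuses_alt]
  set s := PySem.List.sorted arr (fun x => x) true with hs
  have hsne : s ≠ [] := by
    rw [hs, Ne, PySem.List.sorted_eq_nil_iff]; exact hpre
  have hn : 1 ≤ s.length := List.length_pos_of_ne_nil hsne
  have hinit : PySem.List.pySetD (List.replicate s.length (0 : Int)) (-1) 1
      = List.replicate (s.length - 1) 0 ++ rLoop (s.drop (s.length - 1)) := by
    rw [List.drop_length_sub_one hsne]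
    obtain ⟨m, hm⟩ : ∃ m, s.length = m + 1 := ⟨s.length - 1, by omega⟩
    rw [hm]
    have hidx : PySem.List.pyIdx? (m + 1) (-1) = some m := by
      simp only [PySem.List.pyIdx?]
      rw [if_neg (by omega), if_pos (by omega)]
      norm_num
    simp only [PySem.List.pySetD, PySem.List.pySet?, List.length_replicate, hidx,
      Option.map_some, Option.getD_some]
    have h1 : List.replicate (m + 1) (0 : Int) = List.replicate m 0 ++ [0] := List.replicate_succ' ..
    have h2 := set_at_join (List.replicate m (0 : Int)) 0 1 []
    rw [List.length_replicate] at h2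
    rw [h1, h2]
    simp [rLoop]
  have hc : ((s.length : Int)) - 2 = ((s.length - 1 : Nat) : Int) - 1 := by omega
  rw [hinit, hc, loop_inv s (s.length - 1) (by omega)]
  rw [rLoop_eq_map_dRank s (by simpa using PySem.List.sorted_pairwise_rev arr (fun x => x)), ← List.map_reverse]
  refine List.map_congr_left fun v hv => ?_
  exact (rank_getD s v (List.mem_reverse.mp hv)).symm
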